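-- pv_equiv track=rewrite | github.com/zywanska/TCM-Encoder | TCM Encoder.py | coder_4_3
-- ===== SOURCE A (Python) =====
-- def coder_4_3(input_data): #koder 43
--     code_data=[]
--     memo1=0
--     memo2=0
--     memory=memo2^memo1
--     for i in range(len(input_data)):
--         if i>0:
--             memo2=memo1
--             memo1=input_data[i-1]&0b01
--             memory=memo2^memo1
--         code_data.append((input_data[i]<<1)+memory)
--     return code_data
-- ===== SOURCE B (Python) =====
-- def coder_4_3(input_data):
--     bits = [v & 1 for v in input_data]
--     prev1 = [0] + bits[:-1]
--     prev2 = [0, 0] + bits[:-2]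
--     return [(v << 1) + (a ^ b) for v, a, b in zip(input_data, prev1, prev2)]
-- ===== Notes on version B (the rewrite author's own statement) =====
-- stated objective: simpler
-- what changed: Replaces A's incremental two-register (memo1/memo2) state machine updated index by index with a stateless build: compute the low-bit list once, pad/shift it twice, and zip the three lists into the output in one comprehension.
import Mathlib
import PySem

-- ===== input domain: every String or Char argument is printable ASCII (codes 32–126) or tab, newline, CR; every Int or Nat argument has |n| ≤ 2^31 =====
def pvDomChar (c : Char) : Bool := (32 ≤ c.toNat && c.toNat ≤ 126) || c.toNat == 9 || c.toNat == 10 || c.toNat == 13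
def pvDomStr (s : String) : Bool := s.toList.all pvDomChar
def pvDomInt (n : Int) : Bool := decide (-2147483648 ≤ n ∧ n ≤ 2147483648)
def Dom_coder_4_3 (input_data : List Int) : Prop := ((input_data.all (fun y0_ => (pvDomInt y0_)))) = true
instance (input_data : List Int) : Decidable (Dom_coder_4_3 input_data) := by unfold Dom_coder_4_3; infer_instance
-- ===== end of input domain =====

-- B replaces A's incremental two-register state machine with a stateless pad/shift-and-zip build (objective: simpler).

-- ===== PORT A =====
-- literal transliteration of A: loop over range(len(input_data)) carrying
-- (memo1, memo2, memory, code_data); input_data[i] / input_data[i-1] via pyGetD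
-- (indices are always in range in this loop, so the default is never used).
def coder_4_3 (input_data : List Int) : List Int :=
  let s := (PySem.List.pyRange 0 (input_data.length : Int) 1).foldl
    (fun (st : Int × Int × Int × List Int) i =>
      let memo1 := st.1
      let memo2 := st.2.1
      let memory := st.2.2.1
      let code_data := st.2.2.2
      if i > 0 then
        let memo2' := memo1
        let memo1' := PySem.Int.band (PySem.List.pyGetD input_data (i-1) 0) 1
        let memory' := PySem.Int.bxor memo2' memo1'
        (memo1', memo2', memory', code_data ++ [(PySem.List.pyGetD input_data i 0 <<< 1) + memory'])
      else
        (memo1, memo2, memory, code_data ++ [(PySem.List.pyGetD input_data i 0 <<< 1) + memory]))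
    (0, 0, 0, [])
  s.2.2.2

-- ===== PORT B =====
-- literal transliteration of Source B: bits[:-1] is List.dropLast, bits[:-2] is two dropLast
-- (both exact, also for short lists); zip(xs, p1, p2) is the nested List.zip (both truncate to the shortest).
def coder_4_3_alt (input_data : List Int) : List Int :=
  let bits := input_data.map (fun v => PySem.Int.band v 1)
  let prev1 := 0 :: bits.dropLast
  let prev2 := 0 :: 0 :: bits.dropLast.dropLast
  (input_data.zip (prev1.zip prev2)).map (fun vab : Int × (Int × Int) => (vab.1 <<< 1) + PySem.Int.bxor vab.2.1 vab.2.2)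

-- ===== PRECONDITION & SPEC =====
def Spec_coder_4_3 (input_data : List Int) (out : List Int) : Prop := out = coder_4_3_alt input_data
instance (input_data : List Int) (out : List Int) : Decidable (Spec_coder_4_3 input_data out) := by unfold Spec_coder_4_3; infer_instance

-- ===== CLAIM (what is proved, stated in full; the proofs are below) =====
def Claim_equal_coder_4_3 : Prop := ∀ (input_data : List Int), Dom_coder_4_3 input_data → Spec_coder_4_3 input_data (coder_4_3 input_data)

-- ===== LEMMAS AND PROOFS =====

-- the low bit of l[j] (0 outside range; only used in range)
def pvBit (l : List Int) (j : Nat) : Int := PySem.Int.band (l.getD j 0) 1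

-- the i-th output value both programs produce: 2*l[i] + (bit(i-2) XOR bit(i-1)), bits padded with 0
def pvOut (l : List Int) (i : Nat) : Int :=
  (l.getD i 0 <<< 1) +
    PySem.Int.bxor (if 2 ≤ i then pvBit l (i-2) else 0) (if 1 ≤ i then pvBit l (i-1) else 0)

-- loop invariant of A: after k iterations memo1 = bit(k-2), memo2 = bit(k-3) (0-padded),
-- memory = memo2 XOR memo1, and code_data holds the first k outputs
theorem pvA_invariant (l : List Int) (k : Nat) :
    (PySem.List.pyRange 0 (k : Int) 1).foldl
      (fun (st : Int × Int × Int × List Int) i =>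
        let memo1 := st.1
        let memo2 := st.2.1
        let memory := st.2.2.1
        let code_data := st.2.2.2
        if i > 0 then
          let memo2' := memo1
          let memo1' := PySem.Int.band (PySem.List.pyGetD l (i-1) 0) 1
          let memory' := PySem.Int.bxor memo2' memo1'
          (memo1', memo2', memory', code_data ++ [(PySem.List.pyGetD l i 0 <<< 1) + memory'])
        else
          (memo1, memo2, memory, code_data ++ [(PySem.List.pyGetD l i 0 <<< 1) + memory]))
      (0, 0, 0, []) =
    ((if 2 ≤ k then pvBit l (k-2) else 0),
     (if 3 ≤ k then pvBit l (k-3) else 0),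
     PySem.Int.bxor (if 3 ≤ k then pvBit l (k-3) else 0) (if 2 ≤ k then pvBit l (k-2) else 0),
     (List.range k).map (pvOut l)) := by
  induction k with
  | zero => simp [PySem.List.pyRange_one_eq_nil]
  | succ k ih =>
    have hc : ((k+1:Nat):Int) = (k:Int)+1 := by push_cast; ring
    rw [hc, PySem.List.pyRange_one_succ_right (by positivity), List.foldl_append, ih]
    simp only [List.foldl]
    rcases Nat.eq_zero_or_pos k with h0 | hpos
    · subst h0
      norm_num [pvOut, PySem.List.pyGetD_ofNat', List.range_succ]
    · have hgt : ((k:Int)) > 0 := by exact_mod_cast hpos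
      rw [if_pos hgt]
      have hidx : ((k:Int)) - 1 = ((k-1 : Nat) : Int) := by omega
      have h2 : 2 ≤ k + 1 := by omega
      have h1 : 1 ≤ k := hpos
      simp only [hidx, PySem.List.pyGetD_natCast, List.range_succ, List.map_append, List.map_cons, List.map_nil]
      refine Prod.ext ?_ (Prod.ext ?_ (Prod.ext ?_ ?_))
      · simp [pvBit, h2]
      · by_cases h3 : 2 ≤ k
        · have : 3 ≤ k + 1 := by omega
          simp [this, h3, show k+1-3 = k-2 by omega]
        · simp [show ¬ 3 ≤ k+1 by omega, h3]
      · by_cases h3 : 2 ≤ k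
        · have : 3 ≤ k + 1 := by omega
          simp [this, h3, h2, pvBit, show k+1-3 = k-2 by omega]
        · simp [show ¬ 3 ≤ k+1 by omega, h3, h2, pvBit]
      · simp [pvOut, h1, pvBit]

theorem pvA_eq (l : List Int) : coder_4_3 l = (List.range l.length).map (pvOut l) := by
  simp only [coder_4_3]
  rw [pvA_invariant l l.length]

theorem pvB_eq (l : List Int) : coder_4_3_alt l = (List.range l.length).map (pvOut l) := by
  unfold coder_4_3_alt
  apply List.ext_getElem
  · simp; omega
  · intro i h1 h2
    simp only [List.getElem_map, List.getElem_zip, List.getElem_range]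
    have hn : i < l.length := by simpa using h2
    match i with
    | 0 =>
      simp [pvOut, List.getElem?_eq_getElem hn]
    | 1 =>
      have h1' : 1 < l.length := hn
      simp [pvOut, pvBit, h1', Nat.lt_of_succ_lt h1']
      rw [PySem.Int.bxor_comm]
      simp
    | (j+2) =>
      have hj2 : j + 2 < l.length := hn
      have hj1 : j + 1 < l.length := by omega
      have hj : j < l.length := by omega
      simp [pvOut, pvBit, hj, hj1, hj2]
      rw [PySem.Int.bxor_comm]

-- ===== VERDICT (by name: the statement is the Claim_ definition above) =====
theorem coder_4_3_spec : Claim_equal_coder_4_3 := by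
  intro l _
  unfold Spec_coder_4_3
  rw [pvA_eq, pvB_eq]
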